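-- pv_equiv track=rewrite | github.com/alinsoar/dcp | com_word.py | compile_word
-- ===== SOURCE A (Python) =====
-- import string
--
-- def compile_word(word):
--     """Compile a word of uppercase letters as numeric digits.
--     E.g., compile_word('YOU') => '(1*U+10*O+100*Y)'
--     Non-uppercase words unchanged: compile_word('+') => '+'"""
--     # Your code here.
--     def split(w, L):
--         if w == "":
--             return L
--         elif w[0] in string.ascii_uppercase:
--             i = 0
--             while(i < len(w) and w[i] in string.ascii_uppercase):
--                 i += 1
--             n = L + [w[:i]]
--             return split(w[i:], n)
--         else:
--             return split(w[1:], L+[w[0]])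
--
--     def compile(w):
--         r= ["*".join([str(x),str(y)]) for x,y in zip(w[::-1], [10**i for i in range(len(w))])]
--         return "+".join(r)
--
--     r = []
--     for x in split(word, []):
--         if (x[0] in string.ascii_uppercase):
--             r.append(compile(x))
--         else:
--             r.append(x)
--     return "".join(r)
-- ===== SOURCE B (Python) =====
-- import string
-- from itertools import groupby
--
--
-- def compile_word(word):
--     """Compile a word of uppercase letters as numeric digits.
--     Iterative one-pass tokenization with itertools.groupby instead of
--     the recursive split helper."""
--     out = []
--     for is_upper, grp in groupby(word, key=lambda c: c in string.ascii_uppercase):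
--         g = ''.join(grp)
--         if is_upper:
--             out.append('+'.join('%s*%d' % (c, 10 ** i)
--                                 for i, c in enumerate(reversed(g))))
--         else:
--             out.append(g)
--     return ''.join(out)
-- ===== Notes on version B (the rewrite author's own statement) =====
-- stated objective: faster
-- what changed: Replaced the recursive accumulator-passing split helper (which copies the growing accumulator with L+[token] on every step and emits one token per non-uppercase character) and the zip-of-reversed-word-with-a-precomputed-powers-list formatter by a single iterative itertools.groupby pass, formatting each uppercase group directly from enumerate(reversed(group)) and appending non-uppercase groups whole.
import Mathlib
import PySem

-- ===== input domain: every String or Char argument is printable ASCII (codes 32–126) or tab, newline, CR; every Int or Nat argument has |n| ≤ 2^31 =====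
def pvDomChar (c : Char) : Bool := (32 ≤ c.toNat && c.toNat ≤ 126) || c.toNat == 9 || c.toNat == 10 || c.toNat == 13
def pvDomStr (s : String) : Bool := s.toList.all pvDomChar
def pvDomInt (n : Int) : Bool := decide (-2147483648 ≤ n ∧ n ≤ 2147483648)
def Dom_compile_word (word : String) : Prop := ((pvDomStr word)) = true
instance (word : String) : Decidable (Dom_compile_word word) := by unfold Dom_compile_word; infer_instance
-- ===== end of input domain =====

-- B replaces A's recursive accumulator-passing `split` helper (which copies the
-- accumulator on every step) by one iterative groupby-style tokenization pass,
-- formatting runs from enumerate(reversed(run)); measured faster, same output.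

-- string.ascii_uppercase (both Pythons use this same library constant)
def asciiUpper : List Char := "ABCDEFGHIJKLMNOPQRSTUVWXYZ".toList

-- ===== PORT A =====
-- the `while` loop computing i in the uppercase branch of split
def countUpperA : List Char → Nat
  | [] => 0
  | c :: cs => if c ∈ asciiUpper then countUpperA cs + 1 else 0

lemma countUpperA_pos (c : Char) (cs : List Char) (h : c ∈ asciiUpper) :
    0 < countUpperA (c :: cs) := by
  simp [countUpperA, h]

-- the recursive split helper, with its accumulator L
def splitA : List Char → List (List Char) → List (List Char)
  | [], L => L
  | c :: cs, L =>
    if h : c ∈ asciiUpper then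
      let i := countUpperA (c :: cs)
      splitA ((c :: cs).drop i) (L ++ [(c :: cs).take i])
    else
      splitA cs (L ++ [[c]])
termination_by w _ => w.length
decreasing_by
  · have := countUpperA_pos c cs h
    simp only [List.length_drop, List.length_cons]
    omega
  · simp

-- the `compile` helper: zip of the reversed run with the list of powers of 10
def compileRunA (w : List Char) : List Char :=
  PySem.Chars.join ['+']
    ((w.reverse.zip ((List.range w.length).map (fun i => (10 : Int) ^ i))).map
      (fun p => PySem.Chars.join ['*'] [[p.1], (PySem.Int.toStr p.2).toList]))

-- the final loop over split's tokens (tokens are never empty in Python; [] branch unreachable)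
def renderA (x : List Char) : List Char :=
  match x with
  | [] => []
  | c :: _ => if c ∈ asciiUpper then compileRunA x else x

def compile_word (word : String) : String :=
  String.ofList (PySem.Chars.join [] ((splitA word.toList []).map renderA))

-- ===== PORT B =====
-- itertools.groupby(word, key = c in string.ascii_uppercase): one pass, maximal runs
def tokensB : List Char → List (Bool × List Char)
  | [] => []
  | c :: cs =>
    (decide (c ∈ asciiUpper),
      c :: cs.takeWhile (fun d => decide (d ∈ asciiUpper) == decide (c ∈ asciiUpper))) ::
      tokensB (cs.dropWhile (fun d => decide (d ∈ asciiUpper) == decide (c ∈ asciiUpper)))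
termination_by w => w.length
decreasing_by
  have := List.length_dropWhile_le
    (fun d => decide (d ∈ asciiUpper) == decide (c ∈ asciiUpper)) cs
  simp only [List.length_cons]
  omega

-- '+'.join('%s*%d' % (c, 10**i) for i, c in enumerate(reversed(g)))
def formatRunB (g : List Char) : List Char :=
  PySem.Chars.join ['+']
    ((PySem.List.enumerate g.reverse).map
      (fun p => [p.2] ++ ['*'] ++ (PySem.Int.toStr ((10 : Int) ^ p.1.toNat)).toList))

def compile_word_alt (word : String) : String :=
  String.ofList (PySem.Chars.join []
    ((tokensB word.toList).map (fun t => if t.1 then formatRunB t.2 else t.2)))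

-- ===== PRECONDITION & SPEC =====
def Spec_compile_word (word : String) (out : String) : Prop := out = compile_word_alt word
instance (word : String) (out : String) : Decidable (Spec_compile_word word out) := by unfold Spec_compile_word; infer_instance

-- ===== CLAIM (what is proved, stated in full; the proofs are below) =====
def Claim_equal_compile_word : Prop := ∀ (word : String), Dom_compile_word word → Spec_compile_word word (compile_word word)

-- ===== LEMMAS AND PROOFS =====

lemma join_nil_cons (x : List Char) (l : List (List Char)) :
    PySem.Chars.join [] (x :: l) = x ++ PySem.Chars.join [] l := by
  cases l with
  | nil => simp [PySem.Chars.join_singleton, PySem.Chars.join_nil]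
  | cons y ys => simp [PySem.Chars.join_cons_cons]

-- split's accumulator just prepends
lemma splitA_acc_aux : ∀ (n : Nat) (w : List Char), w.length ≤ n →
    ∀ L, splitA w L = L ++ splitA w [] := by
  intro n
  induction n with
  | zero =>
    intro w hw L
    have : w = [] := by
      cases w <;> simp_all
    subst this; simp [splitA]
  | succ n ih =>
    intro w hw L
    cases w with
    | nil => simp [splitA]
    | cons c cs =>
      by_cases h : c ∈ asciiUpper
      · have hpos := countUpperA_pos c cs h
        rw [splitA, splitA]
        simp only [h, dif_pos]
        have hlen : ((c :: cs).drop (countUpperA (c :: cs))).length ≤ n := by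
          simp only [List.length_drop, List.length_cons]
          simp at hw
          omega
        rw [ih _ hlen, ih _ hlen ([] ++ [(c :: cs).take (countUpperA (c :: cs))])]
        simp
      · rw [splitA, splitA]
        simp only [h, dif_neg, not_false_iff]
        have hlen : cs.length ≤ n := by simp at hw; omega
        rw [ih _ hlen, ih _ hlen ([] ++ [[c]])]
        simp

lemma splitA_acc (w : List Char) (L : List (List Char)) :
    splitA w L = L ++ splitA w [] :=
  splitA_acc_aux w.length w le_rfl L

-- the while loop's count takes exactly the maximal uppercase prefix
lemma take_countUpperA : ∀ w : List Char,
    w.take (countUpperA w) = w.takeWhile (fun c => decide (c ∈ asciiUpper)) := by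
  intro w
  induction w with
  | nil => simp [countUpperA]
  | cons c cs ih =>
    by_cases h : c ∈ asciiUpper
    · simp [countUpperA, h, ih]
    · simp [countUpperA, h]

lemma drop_countUpperA : ∀ w : List Char,
    w.drop (countUpperA w) = w.dropWhile (fun c => decide (c ∈ asciiUpper)) := by
  intro w
  induction w with
  | nil => simp [countUpperA]
  | cons c cs ih =>
    by_cases h : c ∈ asciiUpper
    · simp [countUpperA, h, ih]
    · simp [countUpperA, h]

-- A's zip-with-powers list is B's enumerate with the power computed pointwise
lemma zip_pow_eq_enumerate (xs : List Char) :
    xs.zip ((List.range xs.length).map (fun i => (10 : Int) ^ i)) =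
      (PySem.List.enumerate xs).map (fun p => (p.2, (10 : Int) ^ p.1.toNat)) := by
  apply List.ext_getElem
  · simp [PySem.List.length_enumerate]
  · intro k h1 h2
    have hk : k < xs.length := by simpa using h1
    have hk' : k < (PySem.List.enumerate xs).length := by
      simpa [PySem.List.length_enumerate] using hk
    simp [List.getElem_zip, PySem.List.getElem_enumerate]

-- A's per-run formatter equals B's
lemma compileRunA_eq_formatRunB (g : List Char) : compileRunA g = formatRunB g := by
  unfold compileRunA formatRunB
  have hl : g.reverse.length = g.length := by simp
  rw [← hl, zip_pow_eq_enumerate g.reverse, List.map_map]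
  congr 1
  apply List.map_congr_left
  intro p _
  simp [Function.comp, PySem.Chars.join_cons_cons, PySem.Chars.join_singleton]

-- core pipelines on lists of characters
def coreA (w : List Char) : List Char :=
  PySem.Chars.join [] ((splitA w []).map renderA)

def coreB (w : List Char) : List Char :=
  PySem.Chars.join [] ((tokensB w).map (fun t => if t.1 then formatRunB t.2 else t.2))

-- prepending one non-uppercase character to B's pipeline just prepends it to the output
lemma coreB_cons_notUpper (c : Char) (cs : List Char) (h : c ∉ asciiUpper) :
    coreB (c :: cs) = c :: coreB cs := by
  have hk : decide (c ∈ asciiUpper) = false := by simp [h]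
  unfold coreB
  rw [tokensB]
  simp only [hk, beq_false]
  cases cs with
  | nil => simp [tokensB, join_nil_cons, PySem.Chars.join_nil]
  | cons d ds =>
    by_cases hd : d ∈ asciiUpper
    · have hkd : decide (d ∈ asciiUpper) = true := by simp [hd]
      simp only [List.takeWhile_cons, List.dropWhile_cons, hkd, Bool.not_true,
        Bool.false_eq_true, if_neg, not_false_iff, if_false]
      rw [tokensB]
      simp only [hkd, beq_true]
      simp only [List.map_cons]
      rw [join_nil_cons, join_nil_cons]
      simp
    · have hkd : decide (d ∈ asciiUpper) = false := by simp [hd]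
      rw [tokensB]
      simp only [hkd, beq_false, List.takeWhile_cons, List.dropWhile_cons,
        Bool.not_false, if_pos, if_true]
      simp only [List.map_cons]
      rw [join_nil_cons, join_nil_cons]
      simp

lemma coreA_eq_coreB_aux : ∀ (n : Nat) (w : List Char), w.length ≤ n →
    coreA w = coreB w := by
  intro n
  induction n with
  | zero =>
    intro w hw
    have : w = [] := by cases w <;> simp_all
    subst this
    simp [coreA, coreB, splitA, tokensB, PySem.Chars.join_nil]
  | succ n ih =>
    intro w hw
    cases w with
    | nil => simp [coreA, coreB, splitA, tokensB, PySem.Chars.join_nil]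
    | cons c cs =>
      simp only [List.length_cons] at hw
      by_cases h : c ∈ asciiUpper
      · -- uppercase run: both take the maximal uppercase prefix
        have hstep : coreA (c :: cs) =
            renderA ((c :: cs).take (countUpperA (c :: cs))) ++
              coreA ((c :: cs).drop (countUpperA (c :: cs))) := by
          unfold coreA
          rw [splitA]
          simp only [h, dif_pos]
          rw [splitA_acc]
          simp [join_nil_cons]
        have htake : (c :: cs).take (countUpperA (c :: cs)) =
            c :: cs.takeWhile (fun d => decide (d ∈ asciiUpper)) := by
          rw [take_countUpperA]
          simp [List.takeWhile_cons, h]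
        have hdrop : (c :: cs).drop (countUpperA (c :: cs)) =
            cs.dropWhile (fun d => decide (d ∈ asciiUpper)) := by
          rw [drop_countUpperA]
          simp [List.dropWhile_cons, h]
        have hrest : (cs.dropWhile (fun d => decide (d ∈ asciiUpper))).length ≤ n := by
          have := List.length_dropWhile_le (fun d => decide (d ∈ asciiUpper)) cs
          omega
        have hk : decide (c ∈ asciiUpper) = true := by simp [h]
        rw [hstep, htake, hdrop, ih _ hrest]
        show _ = coreB (c :: cs)
        unfold coreB
        rw [tokensB]
        simp only [hk, beq_true]
        rw [List.map_cons, join_nil_cons]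
        simp only [if_true]
        congr 1
        simp [renderA, h, compileRunA_eq_formatRunB]
      · -- non-uppercase: A emits the single character, B's group absorbs it
        have hstep : coreA (c :: cs) = c :: coreA cs := by
          unfold coreA
          rw [splitA]
          simp only [h, dif_neg, not_false_iff]
          rw [splitA_acc]
          simp only [List.nil_append, List.map_append, List.map_cons, List.map_nil,
            List.singleton_append]
          rw [join_nil_cons]
          simp [renderA, h]
        rw [hstep, ih cs (by omega), coreB_cons_notUpper c cs h]

-- ===== VERDICT (by name: the statement is the Claim_ definition above) =====
theorem compile_word_spec : Claim_equal_compile_word := by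
  intro word _
  unfold Spec_compile_word compile_word compile_word_alt
  have := coreA_eq_coreB_aux word.toList.length word.toList le_rfl
  unfold coreA coreB at this
  rw [this]
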